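-- pv_equiv track=rewrite | github.com/ibalram/Programming-Library | CP/CC/Dec20_cookoff_alt/5.py | solve
-- ===== SOURCE A (Python) =====
-- def solve(n,a):
--     from bisect import bisect_left
--     a.sort()
--     res = 0
--     for i in range(n-1):
--         j = bisect_left(a, a[i]+a[i+1])-1
--         if j<=i+1: continue
--         res = max(res, j-i+1)
--     return res
-- ===== SOURCE B (Python) =====
-- def solve(n, a):
--     a.sort()
--     m = len(a)
--     res = 0
--     k = 0
--     for i in range(n - 1):
--         s = a[i] + a[i + 1]
--         while k < m and a[k] < s:
--             k += 1
--         j = k - 1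
--         if j > i + 1:
--             res = max(res, j - i + 1)
--     return res
-- ===== Notes on version B (the rewrite author's own statement) =====
-- stated objective: faster
-- what changed: Replaced the per-iteration bisect_left binary search with a single monotone two-pointer k that only ever advances (total O(n) pointer work across all iterations), relying on a[i]+a[i+1] being non-decreasing after sorting.
import Mathlib
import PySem

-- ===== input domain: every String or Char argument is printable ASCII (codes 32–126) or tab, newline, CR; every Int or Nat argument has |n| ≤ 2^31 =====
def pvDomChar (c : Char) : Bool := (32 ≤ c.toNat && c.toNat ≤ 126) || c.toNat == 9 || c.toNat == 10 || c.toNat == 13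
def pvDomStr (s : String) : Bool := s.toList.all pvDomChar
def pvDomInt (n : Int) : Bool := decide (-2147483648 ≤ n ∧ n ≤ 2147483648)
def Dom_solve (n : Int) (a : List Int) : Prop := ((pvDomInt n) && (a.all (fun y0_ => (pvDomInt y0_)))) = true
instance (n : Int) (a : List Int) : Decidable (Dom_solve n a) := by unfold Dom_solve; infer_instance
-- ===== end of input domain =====

-- B replaces A's per-iteration bisect_left with a monotone two-pointer that only advances;
-- equality is about the return value (both Pythons sort `a` in place).

-- ===== PORT A =====
-- loop body of A: res ↦ updated res for index i (bisect_left is the stdlib call, ported as PySem.List.bisectLeft)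
def solveBodyA (b : List Int) (res : Int) (i : Int) : Int :=
  let j : Int := (PySem.List.bisectLeft b (PySem.List.pyGetD b i 0 + PySem.List.pyGetD b (i+1) 0) : Int) - 1
  if j ≤ i + 1 then res else max res (j - i + 1)

def solve (n : Int) (a : List Int) : Int :=
  let b := PySem.List.sorted a (fun x => x)
  (PySem.List.pyRange 0 (n-1) 1).foldl (solveBodyA b) 0

-- ===== PORT B =====
-- the `while k < m and a[k] < s: k += 1` loop of B
def advanceK (b : List Int) (s : Int) (k : Nat) : Nat :=
  if h : k < b.length then
    if b[k] < s then advanceK b s (k+1) else k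
  else k
termination_by b.length - k

-- loop body of B: state (k, res) ↦ updated state for index i
def solveBodyB (b : List Int) (st : Nat × Int) (i : Int) : Nat × Int :=
  let s := PySem.List.pyGetD b i 0 + PySem.List.pyGetD b (i+1) 0
  let k := advanceK b s st.1
  let j : Int := (k : Int) - 1
  (k, if j > i + 1 then max st.2 (j - i + 1) else st.2)

def solve_alt (n : Int) (a : List Int) : Int :=
  let b := PySem.List.sorted a (fun x => x)
  ((PySem.List.pyRange 0 (n-1) 1).foldl (solveBodyB b) (0, 0)).2

-- ===== PRECONDITION & SPEC =====
-- Pre_ excludes exactly the inputs on which A raises IndexError: n ≥ 2 together with n > len(a)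
-- (the loop then reads a[i+1] past the end; B's Python raises there too).
def Pre_solve (n : Int) (a : List Int) : Prop := n ≤ (a.length : Int) ∨ n ≤ 1
instance (n : Int) (a : List Int) : Decidable (Pre_solve n a) := by unfold Pre_solve; infer_instance

def pvWitness_solve : Int × List Int := (4, [2, 1, 3, 4])

def Spec_solve (n : Int) (a : List Int) (out : Int) : Prop := out = solve_alt n a
instance (n : Int) (a : List Int) (out : Int) : Decidable (Spec_solve n a out) := by unfold Spec_solve; infer_instance

-- ===== CLAIM (what is proved, stated in full; the proofs are below) =====
def Claim_equal_solve : Prop := ∀ (n : Int) (a : List Int), Dom_solve n a → Pre_solve n a → Spec_solve n a (solve n a)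

-- ===== LEMMAS AND PROOFS =====

-- the two-pointer advance, started below the bisect point with everything before it already < s,
-- lands exactly on bisect_left's answer

-- where the two-pointer stops (everything before k is < s, and either k = len or b[k] ≥ s),
-- bisect_left must also be
lemma bisectLeft_eq_of (b : List Int) (hs : b.Pairwise (· ≤ ·)) (s : Int) (k : Nat)
    (hk : k ≤ b.length)
    (hlow : ∀ idx, (h : idx < b.length) → idx < k → b[idx] < s)
    (hstop : k = b.length ∨ ∃ h : k < b.length, ¬ b[k] < s) :
    PySem.List.bisectLeft b s = k := by
  obtain ⟨hle, hbelow, habove⟩ := PySem.List.bisectLeft_spec b s hs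
  set L := PySem.List.bisectLeft b s with hL
  rcases lt_trichotomy L k with h | h | h
  · have hLlen : L < b.length := lt_of_lt_of_le h hk
    have h1 := hlow L hLlen h
    have h2 := habove L hLlen (le_refl L)
    omega
  · exact h
  · rcases hstop with rfl | ⟨hklen, hge⟩
    · omega
    · have := hbelow k hklen h
      omega

lemma advanceK_eq_bisectLeft (b : List Int) (hs : b.Pairwise (· ≤ ·)) (s : Int) :
    ∀ (fuel k : Nat), fuel = b.length - k → k ≤ b.length →
    (∀ idx, (h : idx < b.length) → idx < k → b[idx] < s) →
    advanceK b s k = PySem.List.bisectLeft b s := by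
  intro fuel
  induction fuel with
  | zero =>
    intro k hf hk hlow
    have hk' : k = b.length := by omega
    rw [advanceK, dif_neg (by omega)]
    exact (bisectLeft_eq_of b hs s k hk hlow (Or.inl hk')).symm
  | succ f ih =>
    intro k hf hk hlow
    by_cases hklen : k < b.length
    · by_cases hlt : b[k] < s
      · rw [advanceK, dif_pos hklen, if_pos hlt]
        refine ih (k+1) (by omega) (by omega) ?_
        intro idx h hidx
        rcases Nat.lt_or_ge idx k with h' | h'
        · exact hlow idx h h'
        · have : idx = k := by omega
          subst this; exact hlt
      · rw [advanceK, dif_pos hklen, if_neg hlt]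
        exact (bisectLeft_eq_of b hs s k hk hlow (Or.inr ⟨hklen, hlt⟩)).symm
    · rw [advanceK, dif_neg hklen]
      exact (bisectLeft_eq_of b hs s k hk hlow (Or.inl (by omega))).symm

-- main loop invariant: B's fold with a correctly positioned pointer computes A's fold
lemma loop_eq (b : List Int) (hs : b.Pairwise (· ≤ ·)) (n : Int) (hn : n ≤ (b.length : Int)) :
    ∀ (fuel : Nat) (i0 : Int), fuel = (n - 1 - i0).toNat → 0 ≤ i0 →
    ∀ (k : Nat) (res : Int), k ≤ b.length →
    (i0 < n - 1 → ∀ idx, (h : idx < b.length) → idx < k →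
        b[idx] < PySem.List.pyGetD b i0 0 + PySem.List.pyGetD b (i0+1) 0) →
    ((PySem.List.pyRange i0 (n-1) 1).foldl (solveBodyB b) (k, res)).2
      = (PySem.List.pyRange i0 (n-1) 1).foldl (solveBodyA b) res := by
  intro fuel
  induction fuel with
  | zero =>
    intro i0 hf h0 k res hk hinv
    rw [PySem.List.pyRange_one_eq_nil (by omega)]
    rfl
  | succ f ih =>
    intro i0 hf h0 k res hk hinv
    have hlt : i0 < n - 1 := by omega
    rw [PySem.List.pyRange_one_cons hlt]
    simp only [List.foldl_cons]
    set s := PySem.List.pyGetD b i0 0 + PySem.List.pyGetD b (i0+1) 0 with hsdef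
    obtain ⟨hle, hbelow, habove⟩ := PySem.List.bisectLeft_spec b s hs
    have hadv : advanceK b s k = PySem.List.bisectLeft b s :=
      advanceK_eq_bisectLeft b hs s (b.length - k) k rfl hk (hinv hlt)
    set L := PySem.List.bisectLeft b s with hLdef
    have hBodyB : solveBodyB b (k, res) i0
        = (L, if ((L : Int) - 1) > i0 + 1 then max res ((L : Int) - 1 - i0 + 1) else res) := by
      simp only [solveBodyB, ← hsdef, hadv]
    have hBodyA : solveBodyA b res i0
        = if ((L : Int) - 1) ≤ i0 + 1 then res else max res ((L : Int) - 1 - i0 + 1) := by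
      simp only [solveBodyA, ← hsdef, ← hLdef]
    rw [hBodyB, hBodyA]
    have hres : (if ((L : Int) - 1) > i0 + 1 then max res ((L : Int) - 1 - i0 + 1) else res)
        = (if ((L : Int) - 1) ≤ i0 + 1 then res else max res ((L : Int) - 1 - i0 + 1)) := by
      by_cases hcond : ((L : Int) - 1) ≤ i0 + 1
      · rw [if_neg (by omega), if_pos hcond]
      · rw [if_pos (by omega), if_neg hcond]
    rw [hres]
    refine ih (i0 + 1) (by omega) (by omega) L _ hle ?_
    intro hlt' idx h hidx
    -- b[idx] < s ≤ s'
    have h1 : b[idx] < s := hbelow idx h hidx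
    have hi0 : (0:Int) ≤ i0 := h0
    have hi0len : i0 < (b.length : Int) := by omega
    have hi1len : i0 + 1 < (b.length : Int) := by omega
    have hi2len : i0 + 2 < (b.length : Int) := by omega
    have e0 : PySem.List.pyGetD b i0 0 = b[i0.toNat]'(by omega) :=
      PySem.List.pyGetD_eq_getElem b 0 h0 hi0len
    have e1 : PySem.List.pyGetD b (i0+1) 0 = b[(i0+1).toNat]'(by omega) :=
      PySem.List.pyGetD_eq_getElem b 0 (by omega) hi1len
    have e2 : PySem.List.pyGetD b (i0+2) 0 = b[(i0+2).toNat]'(by omega) :=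
      PySem.List.pyGetD_eq_getElem b 0 (by omega) hi2len
    have hmono := List.pairwise_iff_getElem.mp hs
    have m1 : b[i0.toNat]'(by omega) ≤ b[(i0+1).toNat]'(by omega) :=
      hmono i0.toNat (i0+1).toNat (by omega) (by omega) (by omega)
    have m2 : b[(i0+1).toNat]'(by omega) ≤ b[(i0+2).toNat]'(by omega) :=
      hmono (i0+1).toNat (i0+2).toNat (by omega) (by omega) (by omega)
    have hss : s ≤ PySem.List.pyGetD b (i0+1) 0 + PySem.List.pyGetD b (i0+1+1) 0 := by
      have : i0 + 1 + 1 = i0 + 2 := by ring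
      rw [hsdef, e0, e1, this, e2]
      omega
    omega

-- ===== VERDICT (by name: the statement is the Claim_ definition above) =====
theorem solve_spec : Claim_equal_solve := by
  intro n a _ hpre
  unfold Spec_solve solve solve_alt
  rcases hpre with hlen | hn1
  · have hs := PySem.List.sorted_pairwise a (fun x => x)
    have hlen' : n ≤ ((PySem.List.sorted a (fun x => x)).length : Int) := by
      rw [PySem.List.length_sorted]; exact hlen
    exact (loop_eq (PySem.List.sorted a (fun x => x)) hs n hlen'
      ((n - 1 - 0).toNat) 0 rfl (le_refl 0) 0 0 (Nat.zero_le _)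
      (fun _ idx h hidx => absurd hidx (Nat.not_lt_zero idx))).symm
  · rw [PySem.List.pyRange_one_eq_nil (by omega)]
    rfl
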